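-- pv_equiv track=rewrite | github.com/tfg1434/cp | AtCoder/arc173_a_me.py | solve
-- ===== SOURCE A (Python) =====
-- def solve(n):
--     digits = 1
--     while 9**digits < n:
--         n -= 9**digits
--         digits += 1
--
--     ans = [0]*digits
--     for i in range(digits):
--         head = (n-1)//(9**(digits-i-1))
--         n -= (head)*(9**(digits-i-1))
--
--         ans[i] = head + (i == 0) + (i > 0 and head >= ans[i-1])
--
--
--     return ans
-- ===== SOURCE B (Python) =====
-- def solve(n):
--     # Recursive bijective base-9 descent: peel off the last digit, solve the
--     # smaller index for the prefix, then map the peeled digit so it differs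
--     # from the prefix's last answer digit.  (Defined for n >= 1.)
--     b = (n - 1) % 9 + 1
--     q = (n - b) // 9
--     if q == 0:
--         return [b]
--     pre = solve(q)
--     return pre + [b - (b <= pre[-1])]
-- ===== Notes on version B (the rewrite author's own statement) =====
-- stated objective: alternative
-- what changed: Replaces A's two-phase iterative scheme (length-finding loop subtracting powers of 9, then a left-to-right pass dividing by descending powers of 9 with in-place list writes) by a recursive bijective base-9 descent: peel the last digit with one divmod, recursively solve the smaller prefix index, and append the peeled digit adjusted against the prefix's last answer digit; no powers of 9 and no precomputed length appear at all.
-- outside the precondition, e.g. on solve(0): A returns [0], B does not finish within the time limit; on solve(-3): A returns [-3], B does not finish within the time limit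
import Mathlib
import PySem

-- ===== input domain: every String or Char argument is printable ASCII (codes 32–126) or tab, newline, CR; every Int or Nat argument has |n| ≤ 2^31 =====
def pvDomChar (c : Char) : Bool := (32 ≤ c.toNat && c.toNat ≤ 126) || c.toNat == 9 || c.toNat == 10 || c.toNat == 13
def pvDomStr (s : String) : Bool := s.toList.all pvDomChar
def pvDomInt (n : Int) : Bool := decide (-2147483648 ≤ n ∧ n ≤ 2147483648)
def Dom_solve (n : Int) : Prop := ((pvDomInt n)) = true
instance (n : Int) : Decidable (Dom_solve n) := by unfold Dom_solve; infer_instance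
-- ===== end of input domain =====

-- B replaces A's iterative two-phase scheme (length loop over powers of 9, then a
-- positional pass with descending powers) by a recursive bijective base-9 descent
-- that peels the last digit with one divmod and recurses on the prefix index.

-- ===== PORT A =====

-- while 9**digits < n: n -= 9**digits; digits += 1
def solveLenA (n : Int) (digits : Nat) : Int × Nat :=
  if (9:Int) ^ digits < n then solveLenA (n - 9 ^ digits) (digits + 1) else (n, digits)
termination_by n.toNat
decreasing_by
  have h1 : (0:Int) < 9 ^ digits := by positivity
  omega

-- for i in range(digits): head = (n-1)//9**(digits-i-1); n -= head*…; ans[i] = head + (i==0) + (i>0 and head>=ans[i-1])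
def solveLoopA (d : Nat) (i : Nat) (n : Int) (ans : List Int) : List Int :=
  if i < d then
    let p : Int := 9 ^ (d - i - 1)
    let head := PySem.Int.floordiv (n - 1) p
    let n' := n - head * p
    let v := head + (if i = 0 then 1 else 0) +
      (if 0 < i ∧ ans.getD (i - 1) 0 ≤ head then 1 else 0)
    solveLoopA d (i + 1) n' (ans.set i v)
  else ans
termination_by d - i

def solve (n : Int) : List Int :=
  let (n1, d) := solveLenA n 1
  solveLoopA d 0 n1 (List.replicate d 0)

-- ===== PORT B =====

-- Source B's recursion, made total with a fuel parameter (fuel n.toNat suffices for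
-- every n ≥ 1 since the recursive index (n-1)//9 shrinks; for n ≤ 0 the Python
-- recursion does not terminate and those inputs are outside Pre_solve).
def solveRecB (fuel : Nat) (n : Int) : List Int :=
  match fuel with
  | 0 => []
  | fuel + 1 =>
    let b := PySem.Int.mod (n - 1) 9 + 1          -- (n-1) % 9 + 1
    let q := PySem.Int.floordiv (n - b) 9          -- (n-b) // 9
    if q = 0 then [b]
    else
      let pre := solveRecB fuel q
      -- pre[-1]: pre is nonempty whenever the recursion is reached with n ≥ 1
      pre ++ [b - (if b ≤ pre.getLastD 0 then 1 else 0)]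

def solve_alt (n : Int) : List Int := solveRecB n.toNat n

-- ===== PRECONDITION & SPEC =====
-- Pre_ excludes n ≤ 0 (outside the problem's 1-indexed domain): A returns the
-- degenerate value [n] there, while B's recursion does not terminate.
def Pre_solve (n : Int) : Prop := 1 ≤ n
instance (n : Int) : Decidable (Pre_solve n) := by unfold Pre_solve; infer_instance
def pvWitness_solve : Int := 5

def Spec_solve (n : Int) (out : List Int) : Prop := out = solve_alt n
instance (n : Int) (out : List Int) : Decidable (Spec_solve n out) := by unfold Spec_solve; infer_instance

-- ===== CLAIM (what is proved, stated in full; the proofs are below) =====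
def Claim_equal_solve : Prop := ∀ (n : Int), Dom_solve n → Pre_solve n → Spec_solve n (solve n)

-- ===== LEMMAS AND PROOFS =====

-- the raw base-9 digit list of A's positional pass, most significant first
def msb (m : Int) : Nat → List Int
  | 0 => []
  | k + 1 => (m / 9 ^ k) :: msb (m % 9 ^ k) k

-- the distinct-adjacent-digit mapping applied left to right after a first digit
def renderTail (prev : Int) : List Int → List Int
  | [] => []
  | x :: xs => (x + if prev ≤ x then 1 else 0) :: renderTail (x + if prev ≤ x then 1 else 0) xs

-- A's closed form: F m k = answer when solveLenA returns (m+1, k+1)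
def F (m : Int) (k : Nat) : List Int :=
  (m / 9 ^ k + 1) :: renderTail (m / 9 ^ k + 1) (msb (m % 9 ^ k) k)

-- partial sums 9^1 + … + 9^(d-1)
def Ssum (d : Nat) : Int := ∑ j ∈ Finset.Ico 1 d, (9:Int)^j

theorem Ssum_succ (d : Nat) (h : 1 ≤ d) : Ssum (d + 1) = Ssum d + 9 ^ d := by
  unfold Ssum
  rw [Finset.sum_Ico_succ_top h]

theorem Ssum_mono {a b : Nat} (h : a ≤ b) : Ssum a ≤ Ssum b := by
  unfold Ssum
  apply Finset.sum_le_sum_of_subset_of_nonneg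
  · exact Finset.Ico_subset_Ico le_rfl h
  · intro j _ _; positivity

theorem Ssum_mul (k : Nat) (h : 1 ≤ k) : Ssum (k + 1) = 9 * (1 + Ssum k) := by
  induction k with
  | zero => omega
  | succ k ih =>
    rcases Nat.eq_or_lt_of_le h with h1 | h1
    · simp [Ssum, ← h1, Finset.sum_Ico_succ_top]
    · have hk : 1 ≤ k := by omega
      rw [Ssum_succ (k+1) (by omega)]
      conv_lhs => rw [ih hk]
      rw [Ssum_succ k hk]
      ring

theorem emod_mul_ediv (m P : Int) (hP : 0 < P) : (m % (9 * P)) / 9 = (m / 9) % P := by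
  have h9P : (0:Int) < 9 * P := by positivity
  have hr0 : 0 ≤ m % (9 * P) := Int.emod_nonneg m (by omega)
  have hr1 : m % (9 * P) < 9 * P := Int.emod_lt_of_pos m h9P
  have hdm : m = 9 * P * (m / (9 * P)) + m % (9 * P) := (Int.mul_ediv_add_emod m (9 * P)).symm
  have key : m / 9 = m % (9 * P) / 9 + P * (m / (9 * P)) := by
    conv_lhs => rw [hdm]
    rw [show 9 * P * (m / (9 * P)) + m % (9 * P) = m % (9 * P) + (P * (m / (9 * P))) * 9 by ring]
    rw [Int.add_mul_ediv_right _ _ (by norm_num : (9:Int) ≠ 0)]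
  rw [key, Int.add_mul_emod_self_left, Int.emod_eq_of_lt (Int.ediv_nonneg hr0 (by norm_num))
    ((Int.ediv_lt_iff_lt_mul (by norm_num)).mpr (by linarith))]

theorem msb_succ (m : Int) (k : Nat) : msb m (k + 2) = msb (m / 9) (k + 1) ++ [m % 9] := by
  induction k generalizing m with
  | zero => simp [msb]
  | succ k ih =>
    show (m / 9 ^ (k + 2)) :: msb (m % 9 ^ (k + 2)) (k + 2)
        = ((m / 9) / 9 ^ (k + 1) :: msb ((m / 9) % 9 ^ (k + 1)) (k + 1)) ++ [m % 9]
    have hP : (0:Int) < 9 ^ (k + 1) := by positivity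
    have hhead : m / 9 ^ (k + 2) = (m / 9) / 9 ^ (k + 1) := by
      rw [Int.ediv_ediv_of_nonneg (by norm_num : (0:Int) ≤ 9), show (9:Int) * 9 ^ (k+1) = 9 ^ (k+2) by ring]
    have h1 : (m % 9 ^ (k + 2)) / 9 = (m / 9) % 9 ^ (k + 1) := by
      have := emod_mul_ediv m (9 ^ (k + 1)) hP
      rwa [show (9:Int) * 9 ^ (k+1) = 9 ^ (k+2) by ring] at this
    have h2 : (m % 9 ^ (k + 2)) % 9 = m % 9 :=
      Int.emod_emod_of_dvd m (Dvd.intro (9 ^ (k + 1)) (by ring))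
    rw [ih (m % 9 ^ (k + 2)), h1, h2, hhead]
    simp

theorem set_append_len (l1 l2 : List Int) (v : Int) :
    (l1 ++ l2).set l1.length v = l1 ++ l2.set 0 v := by
  induction l1 with
  | nil => simp
  | cons a t ih => simp [ih]

theorem getD_append_lt (l1 l2 : List Int) (n : Nat) (h : n < l1.length) :
    (l1 ++ l2).getD n 0 = l1.getD n 0 := by
  simp [List.getD, List.getElem?_append_left h]

theorem getD_last (l : List Int) : l.getD (l.length - 1) 0 = l.getLastD 0 := by
  rw [List.getLastD_eq_getLast?, List.getLast?_eq_getElem?]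
  simp [List.getD]

theorem getLastD_cons' (v d : Int) (l : List Int) : (v :: l).getLastD d = l.getLastD v :=
  List.getLastD_cons

theorem loopA_general (k : Nat) (m : Int) (done : List Int) (h : done ≠ []) :
    solveLoopA (done.length + k) done.length (m + 1) (done ++ List.replicate k 0)
      = done ++ renderTail (done.getLastD 0) (msb m k) := by
  induction k generalizing m done with
  | zero => rw [solveLoopA]; simp [renderTail, msb]
  | succ k ih =>
    have hL : 0 < done.length := List.length_pos_iff.mpr h
    have hP : (0:Int) < 9 ^ k := by positivity
    rw [solveLoopA, if_pos (by omega)]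
    simp only [show done.length + (k + 1) - done.length - 1 = k from by omega]
    rw [PySem.Int.floordiv_eq_ediv_of_pos hP]
    rw [getD_append_lt done _ _ (by omega : done.length - 1 < done.length), getD_last]
    simp only [add_sub_cancel_right, if_neg (by omega : ¬ done.length = 0)]
    set v : Int := m / 9 ^ k + 0 + (if 0 < done.length ∧ done.getLastD 0 ≤ m / 9 ^ k then 1 else 0) with hv
    have hset : (done ++ List.replicate (k + 1) 0).set done.length v
        = (done ++ [v]) ++ List.replicate k 0 := by
      rw [set_append_len]; simp [List.replicate_succ]
    have hn' : m + 1 - m / 9 ^ k * 9 ^ k = m % 9 ^ k + 1 := by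
      rw [Int.emod_def]; ring
    rw [hset, hn']
    have := ih (m % 9 ^ k) (done ++ [v]) (by simp)
    simp only [List.length_append, List.length_cons, List.length_nil, zero_add,
      List.getLastD_concat] at this
    rw [show done.length + (k + 1) = done.length + 1 + k from by omega, this]
    have hv' : v = m / 9 ^ k + if done.getLastD 0 ≤ m / 9 ^ k then 1 else 0 := by
      rw [hv, if_congr (and_iff_right hL) rfl rfl]; ring_nf
    rw [hv']
    simp [renderTail, msb]

theorem loopA_full (k : Nat) (m : Int) :
    solveLoopA (k + 1) 0 (m + 1) (List.replicate (k + 1) 0) = F m k := by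
  have hP : (0:Int) < 9 ^ k := by positivity
  rw [solveLoopA, if_pos (by omega)]
  simp only [show k + 1 - 0 - 1 = k from by omega]
  rw [PySem.Int.floordiv_eq_ediv_of_pos hP]
  simp only [add_sub_cancel_right, if_true, lt_irrefl, false_and, if_false, add_zero]
  have hn' : m + 1 - m / 9 ^ k * 9 ^ k = m % 9 ^ k + 1 := by
    rw [Int.emod_def]; ring
  have hset : (List.replicate (k + 1) (0:Int)).set 0 (m / 9 ^ k + 1)
      = [m / 9 ^ k + 1] ++ List.replicate k 0 := by
    simp [List.replicate_succ]
  rw [hn', hset]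
  have := loopA_general k (m % 9 ^ k) [m / 9 ^ k + 1] (by simp)
  simp only [List.length_cons, List.length_nil, zero_add, List.getLastD] at this
  rw [Nat.add_comm 1 k] at this
  simpa [F] using this

-- properties of A's length loop: output position, bounds, and the subtracted sum
theorem lenA_bounds (n : Int) (j : Nat) (h : 1 ≤ n) :
    j ≤ (solveLenA n j).2 ∧ 1 ≤ (solveLenA n j).1 ∧ (solveLenA n j).1 ≤ 9 ^ (solveLenA n j).2 ∧
      (solveLenA n j).1 = n - ∑ i ∈ Finset.Ico j (solveLenA n j).2, (9:Int)^i := by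
  unfold solveLenA
  split
  · rename_i hlt
    have h9 : (0:Int) < 9 ^ j := by positivity
    have ih := lenA_bounds (n - 9 ^ j) (j + 1) (by omega)
    refine ⟨by omega, ih.2.1, ih.2.2.1, ?_⟩
    rw [ih.2.2.2, Finset.sum_eq_sum_Ico_succ_bot (by omega : j < (solveLenA (n - 9^j) (j+1)).2)]
    ring
  · rename_i hge
    refine ⟨by simp, by simpa using h, by simp; omega, by simp⟩
termination_by n.toNat
decreasing_by
  have h1 : (0:Int) < 9 ^ j := by positivity
  omega

theorem solveA_closed (n m : Int) (k : Nat) (h : solveLenA n 1 = (m + 1, k + 1)) :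
    solve n = F m k := by
  unfold solve
  rw [h]
  exact loopA_full k m

-- uniqueness of the length from the interval (Ssum d, Ssum (d+1)]
theorem Ssum_uniq {a b : Nat} {x : Int} (ha : 1 ≤ a) (hb : 1 ≤ b)
    (h1 : Ssum a < x) (h2 : x ≤ Ssum (a + 1)) (h3 : Ssum b < x) (h4 : x ≤ Ssum (b + 1)) :
    a = b := by
  by_contra hne
  rcases Nat.lt_or_ge a b with hab | hab
  · have := Ssum_mono (show a + 1 ≤ b by omega)
    omega
  · have := Ssum_mono (show b + 1 ≤ a by omega)
    omega

-- the mapping pass over an appended last raw digit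
theorem renderTail_append (prev : Int) (xs : List Int) (x : Int) :
    renderTail prev (xs ++ [x])
      = renderTail prev xs ++ [x + if (renderTail prev xs).getLastD prev ≤ x then 1 else 0] := by
  induction xs generalizing prev with
  | nil => simp [renderTail]
  | cons a t ih =>
    show (_ :: renderTail _ (t ++ [x])) = _
    rw [ih]
    simp only [renderTail, getLastD_cons', List.cons_append]

-- bounded one-step split of msb
theorem msb_split (x : Int) (k : Nat) (h0 : 0 ≤ x) (h1 : x < 9 ^ (k + 1)) :
    msb x (k + 1) = msb (x / 9) k ++ [x % 9] := by
  cases k with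
  | zero =>
    have : x % 9 = x := Int.emod_eq_of_lt h0 (by simpa using h1)
    simp [msb, this]
  | succ k => exact msb_succ x k

-- peeling the last digit off A's closed form
theorem F_peel (m : Int) (k : Nat) :
    F m (k + 1) = F (m / 9) k ++ [m % 9 + if (F (m / 9) k).getLastD 0 ≤ m % 9 then 1 else 0] := by
  have hP : (0:Int) < 9 ^ k := by positivity
  have hP1 : (0:Int) < 9 ^ (k + 1) := by positivity
  have hhead : m / 9 ^ (k + 1) = (m / 9) / 9 ^ k := by
    rw [Int.ediv_ediv_of_nonneg (by norm_num : (0:Int) ≤ 9), show (9:Int) * 9 ^ k = 9 ^ (k+1) by ring]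
  have hd : (m % 9 ^ (k + 1)) / 9 = (m / 9) % 9 ^ k := by
    have := emod_mul_ediv m (9 ^ k) hP
    rwa [show (9:Int) * 9 ^ k = 9 ^ (k+1) by ring] at this
  have hm : (m % 9 ^ (k + 1)) % 9 = m % 9 :=
    Int.emod_emod_of_dvd m (Dvd.intro (9 ^ k) (by ring))
  have hsplit := msb_split (m % 9 ^ (k + 1)) k (Int.emod_nonneg m (by positivity))
    (Int.emod_lt_of_pos m hP1)
  rw [hd, hm] at hsplit
  unfold F
  rw [hsplit, renderTail_append, hhead, getLastD_cons']
  simp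

-- main lemma: the B recursion computes A's closed form
theorem recB_eq_F (fuel : Nat) (n m : Int) (k : Nat) (hn : 1 ≤ n) (hf : n ≤ (fuel : Int))
    (hlen : solveLenA n 1 = (m + 1, k + 1)) : solveRecB fuel n = F m k := by
  induction fuel generalizing n m k with
  | zero => exfalso; simp at hf; omega
  | succ fuel ih =>
    have hb : PySem.Int.mod (n - 1) 9 = (n - 1) % 9 :=
      PySem.Int.mod_eq_emod_of_pos (by norm_num)
    have hm9 : 0 ≤ (n - 1) % 9 ∧ (n - 1) % 9 < 9 :=
      ⟨Int.emod_nonneg _ (by norm_num), Int.emod_lt_of_pos _ (by norm_num)⟩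
    have hq9 : n - ((n - 1) % 9 + 1) = 9 * ((n - 1) / 9) := by
      have := Int.ediv_add_emod (n - 1) 9
      omega
    have hq : PySem.Int.floordiv (n - (PySem.Int.mod (n - 1) 9 + 1)) 9 = (n - 1) / 9 := by
      rw [hb, PySem.Int.floordiv_eq_ediv_of_pos (by norm_num), hq9,
        Int.mul_ediv_cancel_left _ (by norm_num : (9:Int) ≠ 0)]
    have hq0 : 0 ≤ (n - 1) / 9 := Int.ediv_nonneg (by omega) (by norm_num)
    -- facts from A's length loop on n
    have hbnd := lenA_bounds n 1 hn
    rw [hlen] at hbnd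
    obtain ⟨-, hm1, hm2, hm3⟩ := hbnd
    dsimp only at hm1 hm2 hm3
    have hm3' : m + 1 = n - Ssum (k + 1) := by
      unfold Ssum; exact hm3
    simp only [solveRecB]
    rw [hq, hb]
    by_cases hz : (n - 1) / 9 = 0
    · -- single-digit case
      rw [if_pos hz]
      have hn9 : n ≤ 9 := by
        by_contra hgt
        have : 1 ≤ (n - 1) / 9 := by
          rw [Int.le_ediv_iff_mul_le (by norm_num : (0:Int) < 9)]; omega
        omega
      have hk0 : k = 0 := by
        by_contra hk
        have hS2 : Ssum 2 = 9 := by simp [Ssum]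
        have h9 : (9:Int) ≤ Ssum (k + 1) := by
          have := Ssum_mono (show 2 ≤ k + 1 by omega)
          omega
        omega
      subst hk0
      norm_num at hm2
      have hS1 : Ssum (0 + 1) = 0 := by simp [Ssum]
      have hmn : m = n - 1 := by omega
      have hmod : (n - 1) % 9 = n - 1 := Int.emod_eq_of_lt (by omega) (by omega)
      simp [F, msb, renderTail, hmod, hmn]
    · -- n ≥ 10: peel the last digit and recurse
      rw [if_neg hz]
      set q : Int := (n - 1) / 9 with hqdef
      have hq1 : 1 ≤ q := by omega
      have hn10 : 10 ≤ n := by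
        by_contra hlt
        have : (n - 1) / 9 = 0 := by
          rw [Int.ediv_eq_zero_of_lt (by omega) (by omega)]
        omega
      have hk1 : 1 ≤ k := by
        by_contra hk
        have hk0 : k = 0 := by omega
        rw [hk0] at hm2 hm3'
        have hS1 : Ssum (0 + 1) = 0 := by simp [Ssum]
        simp at hm2
        omega
      obtain ⟨k', rfl⟩ : ∃ k', k = k' + 1 := ⟨k - 1, by omega⟩
      have hSmul : Ssum (k' + 1 + 1) = 9 * (1 + Ssum (k' + 1)) := Ssum_mul (k' + 1) (by omega)
      -- the raw index n-1 decomposes as m + 9*(1 + Ssum (k'+1))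
      have hdecomp : n - 1 = m + 9 * (1 + Ssum (k' + 1)) := by omega
      have hqm : q = m / 9 + (1 + Ssum (k' + 1)) := by
        rw [hqdef, hdecomp, show m + 9 * (1 + Ssum (k' + 1)) = m + (1 + Ssum (k' + 1)) * 9 by ring,
          Int.add_mul_ediv_right _ _ (by norm_num : (9:Int) ≠ 0)]
      have hm0 : 0 ≤ m := by omega
      have hmd9 : 0 ≤ m / 9 := Int.ediv_nonneg hm0 (by norm_num)
      -- bounds placing q in the interval (Ssum (k'+1), Ssum (k'+2)]
      have hqlow : Ssum (k' + 1) < q := by omega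
      have hqhigh : q ≤ Ssum (k' + 1 + 1) := by
        have hdiv : m / 9 ≤ 9 ^ (k' + 1) - 1 := by
          have : m / 9 < 9 ^ (k' + 1) := by
            rw [Int.ediv_lt_iff_lt_mul (by norm_num : (0:Int) < 9)]
            calc m ≤ 9 ^ (k' + 1 + 1) - 1 := by omega
              _ < 9 ^ (k' + 1) * 9 := by rw [pow_succ]; omega
          omega
        rw [Ssum_succ (k' + 1) (by omega)]
        omega
      -- A's length loop on q returns (m/9 + 1, k'+1)
      have hbq := lenA_bounds q 1 hq1
      obtain ⟨hd1, hp1, hp2, hp3⟩ := hbq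
      obtain ⟨d', hd'⟩ : ∃ d', (solveLenA q 1).2 = d' + 1 := ⟨(solveLenA q 1).2 - 1, by omega⟩
      have hp3' : (solveLenA q 1).1 = q - Ssum (d' + 1) := by
        rw [hp3, hd']; rfl
      have hdlow : Ssum (d' + 1) < q := by omega
      have hdhigh : q ≤ Ssum (d' + 1 + 1) := by
        rw [Ssum_succ (d' + 1) (by omega)]
        rw [hd'] at hp2
        omega
      have hdk : d' + 1 = k' + 1 := Ssum_uniq (by omega) (by omega) hdlow hdhigh hqlow hqhigh
      have hlenq : solveLenA q 1 = (m / 9 + 1, k' + 1) := by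
        have h2 : (solveLenA q 1).2 = k' + 1 := by omega
        have h1 : (solveLenA q 1).1 = m / 9 + 1 := by
          rw [hp3', hdk] at *
          omega
        rw [← h1, ← h2]
      -- fuel suffices for the recursive call
      have hfq : q ≤ (fuel : Int) := by
        have hq9' : q * 9 ≤ n - 1 := by
          rw [hqdef]
          exact Int.ediv_mul_le _ (by norm_num)
        push_cast at hf ⊢
        omega
      rw [ih q (m / 9) k' hq1 hfq hlenq]
      -- last digit: b - (b ≤ prev) = m%9 + (prev ≤ m%9)
      have hmod : (n - 1) % 9 = m % 9 := by
        rw [hdecomp, show m + 9 * (1 + Ssum (k' + 1)) = m + 9 * (1 + Ssum (k' + 1)) by ring,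
          Int.add_mul_emod_self_left]
      rw [F_peel, hmod]
      congr 1
      have h9m : 0 ≤ m % 9 ∧ m % 9 < 9 :=
        ⟨Int.emod_nonneg _ (by norm_num), Int.emod_lt_of_pos _ (by norm_num)⟩
      split_ifs <;> simp <;> omega

-- ===== VERDICT (by name: the statement is the Claim_ definition above) =====
theorem solve_spec : Claim_equal_solve := by
  intro n _ hpre
  unfold Spec_solve solve_alt
  obtain ⟨hj, h1, h2, h3⟩ := lenA_bounds n 1 hpre
  obtain ⟨m, hm⟩ : ∃ m : Int, (solveLenA n 1).1 = m + 1 := ⟨(solveLenA n 1).1 - 1, by ring⟩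
  obtain ⟨k, hk⟩ : ∃ k : Nat, (solveLenA n 1).2 = k + 1 := ⟨(solveLenA n 1).2 - 1, by omega⟩
  have hlen : solveLenA n 1 = (m + 1, k + 1) := by
    rw [← hm, ← hk]
  rw [solveA_closed n m k hlen, recB_eq_F n.toNat n m k hpre (by omega) hlen]
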